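-- pv_equiv track=rewrite | github.com/xyz-1703/Pneuma | backend/services/emotion.py | _build_context_window
-- ===== SOURCE A (Python) =====
-- from typing import Tuple, Dict, List, Optional
--
-- SHORT_MSG_THRESHOLD = 3  # words
--
-- def _build_context_window(current_msg: str, history: Optional[List[Dict]] = None) -> str:
--     """
--     Build a sliding context window from recent messages for better emotion detection.
--     For short messages, uses the last 2-3 messages for context.
--     """
--     word_count = len(current_msg.strip().split())
--
--     # If message is long enough, use it alone
--     if word_count > SHORT_MSG_THRESHOLD:
--         return current_msg
--
--     # For short messages, build context from history
--     context_parts = []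
--     if history:
--         # Get last 2 user messages for context
--         user_messages = [m.get("message", "") for m in history if m.get("role") == "user"]
--         context_parts.extend(user_messages[-2:])
--
--     context_parts.append(current_msg)
--     return " ".join(filter(None, context_parts))
-- ===== SOURCE B (Python) =====
-- from typing import Dict, List, Optional
--
-- SHORT_MSG_THRESHOLD = 3  # words
--
-- def _build_context_window(current_msg: str, history: Optional[List[Dict]] = None) -> str:
--     word_count = len(current_msg.strip().split())
--     if word_count > SHORT_MSG_THRESHOLD:
--         return current_msg
--     buf = []
--     if history:
--         # scan from the end, stop as soon as two user messages are found
--         for m in reversed(history):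
--             if m.get("role") == "user":
--                 buf.append(m.get("message", ""))
--                 if len(buf) == 2:
--                     break
--         buf.reverse()
--     buf.append(current_msg)
--     return " ".join(filter(None, buf))
-- ===== Notes on version B (the rewrite author's own statement) =====
-- stated objective: alternative
-- what changed: B scans history in reverse with an early break after collecting two user messages and then reverses the buffer, instead of A's forward comprehension over all of history followed by a slice of the last two.
import Mathlib
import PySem

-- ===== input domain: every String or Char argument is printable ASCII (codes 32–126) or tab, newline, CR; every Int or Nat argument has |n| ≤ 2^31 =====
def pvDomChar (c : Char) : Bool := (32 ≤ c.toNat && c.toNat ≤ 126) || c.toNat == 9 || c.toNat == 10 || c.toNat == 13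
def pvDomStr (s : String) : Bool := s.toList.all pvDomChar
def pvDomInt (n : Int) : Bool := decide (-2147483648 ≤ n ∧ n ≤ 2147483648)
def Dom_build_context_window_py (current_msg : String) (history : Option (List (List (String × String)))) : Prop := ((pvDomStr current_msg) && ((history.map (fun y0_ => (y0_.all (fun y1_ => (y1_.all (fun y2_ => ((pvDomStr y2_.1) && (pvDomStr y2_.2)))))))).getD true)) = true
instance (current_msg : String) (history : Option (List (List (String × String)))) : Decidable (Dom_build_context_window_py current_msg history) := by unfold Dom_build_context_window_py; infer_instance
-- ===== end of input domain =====

-- B replaces the forward collect-all-then-slice of A by a reverse scan of history that stops after two user messages (alternative decomposition, same cost).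


-- ===== PORT A =====
def build_context_window_py (current_msg : String) (history : Option (List (List (String × String)))) : String :=
  let word_count := (PySem.Str.split₀ (PySem.Str.strip current_msg)).length
  if word_count > 3 then current_msg
  else
    let context_parts : List String :=
      match history with
      | none => []
      | some h =>
        if h.isEmpty then []
        else
          let user_messages :=
            (h.filter (fun m => (PySem.Dict.mk m).get? "role" == some "user")).map
              (fun m => (PySem.Dict.mk m).getD "message" "")
          PySem.List.slice user_messages (some (-2)) none
    let context_parts := context_parts ++ [current_msg]
    PySem.Str.join " " (context_parts.filter (fun s => s ≠ ""))

-- ===== PORT B =====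
-- reverse scan: collect user messages from the end, break once two are found
def bcwCollect : List (List (String × String)) → List String → List String
  | [], buf => buf
  | m :: rest, buf =>
    if (PySem.Dict.mk m).get? "role" == some "user" then
      let buf' := buf ++ [(PySem.Dict.mk m).getD "message" ""]
      if buf'.length == 2 then buf' else bcwCollect rest buf'
    else bcwCollect rest buf

def build_context_window_py_alt (current_msg : String) (history : Option (List (List (String × String)))) : String :=
  let word_count := (PySem.Str.split₀ (PySem.Str.strip current_msg)).length
  if word_count > 3 then current_msg
  else
    let buf : List String :=
      match history with
      | none => []
      | some h => if h.isEmpty then [] else (bcwCollect h.reverse []).reverse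
    PySem.Str.join " " ((buf ++ [current_msg]).filter (fun s => s ≠ ""))

-- ===== PRECONDITION & SPEC =====
def Spec_build_context_window_py (current_msg : String) (history : Option (List (List (String × String)))) (out : String) : Prop := out = build_context_window_py_alt current_msg history
instance (current_msg : String) (history : Option (List (List (String × String)))) (out : String) : Decidable (Spec_build_context_window_py current_msg history out) := by unfold Spec_build_context_window_py; infer_instance

-- ===== CLAIM (what is proved, stated in full; the proofs are below) =====
def Claim_equal_build_context_window_py : Prop := ∀ (current_msg : String) (history : Option (List (List (String × String)))), Dom_build_context_window_py current_msg history → Spec_build_context_window_py current_msg history (build_context_window_py current_msg history)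

-- ===== LEMMAS AND PROOFS =====

-- the reverse scan with early break collects the first two filtered-mapped elements
theorem bcwCollect_eq_take (l : List (List (String × String))) (buf : List String)
    (hb : buf.length ≤ 1) :
    bcwCollect l buf =
      (buf ++ (l.filter (fun m => (PySem.Dict.mk m).get? "role" == some "user")).map
        (fun m => (PySem.Dict.mk m).getD "message" "")).take 2 := by
  induction l generalizing buf with
  | nil =>
    simp only [bcwCollect, List.filter_nil, List.map_nil, List.append_nil]
    exact (List.take_of_length_le (by omega)).symm
  | cons m rest ih =>
    simp only [bcwCollect, List.filter_cons]
    by_cases hp : ((PySem.Dict.mk m).get? "role" == some "user") = true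
    · simp only [hp, if_true]
      by_cases h2 : buf.length + 1 = 2
      · have hb1 : buf.length = 1 := by omega
        obtain ⟨x, hx⟩ : ∃ x, buf = [x] := by
          cases buf with
          | nil => simp at hb1
          | cons a t => cases t with
            | nil => exact ⟨a, rfl⟩
            | cons b u => simp at hb1
        simp [hx, List.take]
      · have hb0 : buf.length = 0 := by omega
        have hbe : buf = [] := List.eq_nil_of_length_eq_zero hb0
        subst hbe
        simp only [List.nil_append, List.length_cons, List.length_nil]
        rw [if_neg (by simp)]
        simp [ih [(PySem.Dict.mk m).getD "message" ""] (by simp)]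
    · simp only [hp]
      exact ih buf hb

-- ===== VERDICT (by name: the statement is the Claim_ definition above) =====
theorem build_context_window_py_spec : Claim_equal_build_context_window_py := by
  intro current_msg history _
  unfold Spec_build_context_window_py build_context_window_py build_context_window_py_alt
  simp only []
  by_cases hw : (PySem.Str.split₀ (PySem.Str.strip current_msg)).length > 3
  · simp [hw]
  · simp only [hw, if_false]
    cases history with
    | none => rfl
    | some h =>
      by_cases he : h.isEmpty
      · simp [he]
      · simp only [he]
        rw [bcwCollect_eq_take h.reverse [] (by simp),
            PySem.List.slice_from_neg_ofNat _ 2 (by omega),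
            List.filter_reverse, List.map_reverse, List.nil_append,
            List.take_reverse, List.reverse_reverse]
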